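-- pv_equiv track=rewrite | github.com/Upsurge-11/DSA | Leetcode/Python/count_collisions_on_a_road.py | countCollisions
-- ===== SOURCE A (Python) =====
-- def countCollisions(directions: str) -> int:
--   res = 0
--   flag = -1
--
--   for d in directions:
--     if d == "L":
--       if flag >= 0:
--         res += flag + 1
--         flag = 0
--     elif d == "S":
--       if flag >= 0:
--         res += flag
--       flag = 0
--     else:
--       if flag >= 0:
--         flag += 1
--       else:
--         flag = 1
--
--   return res
-- ===== SOURCE B (Python) =====
-- def countCollisions(directions: str) -> int:
--   # Trim the leading 'L' cars (they drive away left) and the trailing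
--   # rightward-moving cars (they drive away right); every remaining
--   # non-'S' car collides exactly once.
--   i = 0
--   while i < len(directions) and directions[i] == 'L':
--     i += 1
--   j = len(directions)
--   while j > i and directions[j-1] != 'L' and directions[j-1] != 'S':
--     j -= 1
--   return sum(1 for c in directions[i:j] if c != 'S')
-- ===== Notes on version B (the rewrite author's own statement) =====
-- stated objective: simpler
-- what changed: Replaces A's left-to-right simulation with a (res, flag) collision state machine by a trim-then-count strategy: trim the leading leftward cars and the trailing rightward run, then count the remaining moving cars.
import Mathlib
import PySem

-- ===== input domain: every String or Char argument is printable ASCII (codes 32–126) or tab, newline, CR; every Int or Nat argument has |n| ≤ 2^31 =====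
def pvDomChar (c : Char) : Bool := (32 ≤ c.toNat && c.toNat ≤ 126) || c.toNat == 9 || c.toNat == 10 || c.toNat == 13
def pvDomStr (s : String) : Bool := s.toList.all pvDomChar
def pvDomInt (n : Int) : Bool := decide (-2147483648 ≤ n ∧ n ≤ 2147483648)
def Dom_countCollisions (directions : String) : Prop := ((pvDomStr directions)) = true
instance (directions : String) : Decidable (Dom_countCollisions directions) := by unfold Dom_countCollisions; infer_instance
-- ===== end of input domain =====

-- B replaces A's collision-simulation state machine by trim-leading-'L' /
-- trim-trailing-rightward then count non-'S' chars (simpler, same O(n) cost).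

-- ===== PORT A =====
-- one step of A's for-loop, state = (res, flag)
def pvStepA (st : Int × Int) (d : Char) : Int × Int :=
  if d = 'L' then
    if st.2 ≥ 0 then (st.1 + st.2 + 1, 0) else st
  else if d = 'S' then
    (if st.2 ≥ 0 then st.1 + st.2 else st.1, 0)
  else
    if st.2 ≥ 0 then (st.1, st.2 + 1) else (st.1, 1)

def countCollisions (directions : String) : Int :=
  (directions.toList.foldl pvStepA (0, -1)).1

-- ===== PORT B =====
-- first while loop: advance i past the leading 'L's; the Lean state is the
-- remaining window directions[i:] instead of the index i (same steps)
def pvTrimL : List Char → List Char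
  | [] => []
  | c :: cs => if c = 'L' then pvTrimL cs else c :: cs

-- second while loop: retreat j past the trailing rightward run; the Lean state
-- is the window up to j instead of the index j (same steps)
def pvTrimR (l : List Char) : List Char :=
  if h : l = [] then []
  else if l.getLast h ≠ 'L' ∧ l.getLast h ≠ 'S' then pvTrimR l.dropLast
  else l
termination_by l.length
decreasing_by
  simp [List.length_dropLast]
  exact List.length_pos_iff.mpr h

def countCollisions_alt (directions : String) : Int :=
  -- sum(1 for c in t if c != 'S')
  ((pvTrimR (pvTrimL directions.toList)).countP (fun c => !(c == 'S')) : Int)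

-- ===== PRECONDITION & SPEC =====
def Spec_countCollisions (directions : String) (out : Int) : Prop := out = countCollisions_alt directions
instance (directions : String) (out : Int) : Decidable (Spec_countCollisions directions out) := by unfold Spec_countCollisions; infer_instance

-- ===== CLAIM (what is proved, stated in full; the proofs are below) =====
def Claim_equal_countCollisions : Prop := ∀ (directions : String), Dom_countCollisions directions → Spec_countCollisions directions (countCollisions directions)

-- ===== LEMMAS AND PROOFS =====

-- "rightward-moving" characters: everything except 'L' and 'S'
def pvIsR (c : Char) : Bool := !(c == 'L') && !(c == 'S')

@[simp] theorem pvTrimR_nil : pvTrimR [] = [] := by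
  rw [pvTrimR.eq_def]; simp

theorem pvTrimR_eq_reverse (l : List Char) :
    pvTrimR l = ((l.reverse.dropWhile pvIsR)).reverse := by
  induction l using List.reverseRecOn with
  | nil => simp
  | append_singleton xs x ih =>
      rw [pvTrimR.eq_def]
      simp only [List.reverse_append, List.reverse_cons, List.reverse_nil, List.nil_append,
        List.cons_append, List.dropWhile_cons]
      by_cases hx : pvIsR x = true
      · have hx' : x ≠ 'L' ∧ x ≠ 'S' := by
          simpa [pvIsR] using hx
        simp [hx', hx, ih]
      · have hx' : ¬(x ≠ 'L' ∧ x ≠ 'S') := by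
          simpa [pvIsR, Decidable.not_and_iff_not_or_not] using hx
        simp [hx', hx]

theorem pvTrimR_cons (c : Char) (v : List Char) :
    pvTrimR (c :: v) =
      if pvIsR c ∧ pvTrimR v = [] then [] else c :: pvTrimR v := by
  rw [pvTrimR_eq_reverse, pvTrimR_eq_reverse, List.reverse_cons, List.dropWhile_append]
  by_cases hv : List.dropWhile pvIsR v.reverse = []
  · by_cases hc : pvIsR c = true <;> simp [hv, hc]
  · have hv' : (List.dropWhile pvIsR v.reverse).reverse ≠ [] := by
      simpa using hv
    simp [hv, hv']

-- the core invariant of A's loop: starting from a non-negative flag,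
-- the final res is r + (non-'S' count of the trimmed rest) + the old flag
-- unless the whole rest is rightward-moving.
theorem pvInvariant (u : List Char) (r f : Int) (hf : 0 ≤ f) :
    (u.foldl pvStepA (r, f)).1 =
      r + (pvTrimR u).countP (fun c => !(c == 'S')) +
        (if pvTrimR u = [] then 0 else f) := by
  induction u generalizing r f with
  | nil => simp
  | cons c v ih =>
      rw [List.foldl_cons, pvTrimR_cons]
      by_cases hL : c = 'L'
      · have h1 : pvStepA (r, f) c = (r + f + 1, 0) := by
          simp [pvStepA, hL, hf]
        rw [h1, ih _ _ le_rfl]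
        simp [pvIsR, hL]
        ring
      · by_cases hS : c = 'S'
        · have h1 : pvStepA (r, f) c = (r + f, 0) := by
            simp [pvStepA, hS, hf]
          rw [h1, ih _ _ le_rfl]
          simp [pvIsR, hS]
          ring
        · have hR : pvIsR c = true := by simp [pvIsR, hL, hS]
          have h1 : pvStepA (r, f) c = (r, f + 1) := by
            simp [pvStepA, hL, hS, hf]
          rw [h1, ih _ _ (by omega)]
          by_cases hv : pvTrimR v = []
          · simp [hv, hR]
          · simp [hv, hR, hS]
            ring

-- skipping leading 'L's leaves A's initial state (0, -1) unchanged
theorem pvFoldl_trimL (l : List Char) :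
    l.foldl pvStepA (0, -1) = (pvTrimL l).foldl pvStepA (0, -1) := by
  induction l with
  | nil => rfl
  | cons c v ih =>
      by_cases hL : c = 'L'
      · have h1 : pvStepA ((0 : Int), (-1 : Int)) c = (0, -1) := by
          simp [pvStepA, hL]
        rw [List.foldl_cons, h1, show pvTrimL (c :: v) = pvTrimL v by
          simp [pvTrimL, hL]]
        exact ih
      · simp [pvTrimL, hL]

-- on a list not starting with 'L', the initial flags -1 and 0 give the same res
theorem pvFoldl_init (t : List Char) (h : ∀ c v, t = c :: v → c ≠ 'L') :
    (t.foldl pvStepA (0, -1)).1 = (t.foldl pvStepA (0, 0)).1 := by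
  cases t with
  | nil => rfl
  | cons c v =>
      have hc := h c v rfl
      have h1 : pvStepA ((0 : Int), (-1 : Int)) c = pvStepA (0, 0) c := by
        by_cases hS : c = 'S' <;> simp [pvStepA, hc, hS]
      simp [List.foldl_cons, h1]

theorem pvTrimL_head (l : List Char) :
    ∀ c v, pvTrimL l = c :: v → c ≠ 'L' := by
  induction l with
  | nil => intro c v h; simp [pvTrimL] at h
  | cons a u ih =>
      intro c v h
      by_cases hL : a = 'L'
      · exact ih c v (by simpa [pvTrimL, hL] using h)
      · rw [pvTrimL, if_neg hL] at h
        cases h; exact hL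

-- ===== VERDICT (by name: the statement is the Claim_ definition above) =====
theorem countCollisions_spec : Claim_equal_countCollisions := by
  intro directions _
  unfold Spec_countCollisions countCollisions countCollisions_alt
  rw [pvFoldl_trimL, pvFoldl_init _ (pvTrimL_head _),
    pvInvariant _ 0 0 le_rfl]
  simp
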